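-- pv_equiv track=rewrite | github.com/milk717/algorithm | 백준/Silver/9549. 암호화된 비밀번호/암호화된 비밀번호.py | is_encryptable
-- ===== SOURCE A (Python) =====
-- ALPHA_CNT = 26
--
-- ASCII_LOWER_ALPHA = 97
--
-- def is_encryptable(encryption_text, plain_text):
--   window_cnt = [0] * ALPHA_CNT
--   plain_cnt = [0] * ALPHA_CNT
--   window_size = len(plain_text)
--
--   for char in encryption_text[:window_size]:
--     window_cnt[ord(char) - ASCII_LOWER_ALPHA] += 1
--
--   for char in plain_text:
--     plain_cnt[ord(char) - ASCII_LOWER_ALPHA] += 1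
--
--   diff = sum(1 for i in range(ALPHA_CNT) if window_cnt[i] != plain_cnt[i])
--
--   if diff == 0:
--     return True
--
--   for i in range(window_size, len(encryption_text)):
--     remove_index = ord(encryption_text[i-window_size]) - ASCII_LOWER_ALPHA
--     add_index = ord(encryption_text[i]) - ASCII_LOWER_ALPHA
--
--     # 윈도우 맨 왼쪽에 있는거 빼기
--     if plain_cnt[remove_index] == window_cnt[remove_index]:
--       diff += 1
--
--     window_cnt[remove_index] -= 1
--
--     if plain_cnt[remove_index] == window_cnt[remove_index]:
--       diff -= 1
--
--     # 윈도우 오른쪽에 문자 새로 추가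
--     if plain_cnt[add_index] == window_cnt[add_index]:
--       diff += 1
--
--     window_cnt[add_index] += 1
--
--     if plain_cnt[add_index] == window_cnt[add_index]:
--       diff -= 1
--
--     if diff == 0:
--       return True
--
--   return False
-- ===== SOURCE B (Python) =====
-- ALPHA_CNT = 26
--
-- ASCII_LOWER_ALPHA = 97
--
-- def is_encryptable(encryption_text, plain_text):
--   plain_cnt = [0] * ALPHA_CNT
--   for char in plain_text:
--     plain_cnt[ord(char) - ASCII_LOWER_ALPHA] += 1
--
--   window_size = len(plain_text)
--
--   for start in range(len(encryption_text) - window_size + 1):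
--     window_cnt = [0] * ALPHA_CNT
--     for char in encryption_text[start:start + window_size]:
--       window_cnt[ord(char) - ASCII_LOWER_ALPHA] += 1
--     if window_cnt == plain_cnt:
--       return True
--
--   return False
-- ===== Notes on version B (the rewrite author's own statement) =====
-- stated objective: simpler
-- what changed: Drops A's incremental sliding-window update with a mismatch counter ('diff') and instead rebuilds the 26-letter count array from scratch for every window start and compares it whole against the plain-text counts, returning at the first match.
-- outside the precondition, e.g. on is_encryptable('ab{', 'ba'): A returns True, B returns True
import Mathlib
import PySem

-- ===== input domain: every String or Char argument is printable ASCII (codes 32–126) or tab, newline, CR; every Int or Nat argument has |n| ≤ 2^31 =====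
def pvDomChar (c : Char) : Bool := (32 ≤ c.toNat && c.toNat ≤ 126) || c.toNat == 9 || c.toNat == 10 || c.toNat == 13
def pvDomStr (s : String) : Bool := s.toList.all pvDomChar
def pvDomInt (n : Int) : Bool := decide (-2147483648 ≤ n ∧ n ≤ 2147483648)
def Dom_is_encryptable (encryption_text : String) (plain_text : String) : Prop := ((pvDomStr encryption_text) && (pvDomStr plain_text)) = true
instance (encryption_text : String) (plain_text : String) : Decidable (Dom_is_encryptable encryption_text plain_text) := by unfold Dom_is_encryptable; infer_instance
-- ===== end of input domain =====

-- B replaces A's incremental sliding-window diff bookkeeping with a plain rescan that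
-- rebuilds the 26-letter count array for every window start (simpler, not faster).


-- ===== PORT A =====

-- shared helpers for `cnt[ord(char) - 97]` arithmetic with Python's negative-index wraparound
-- (both Python sources contain this very statement)
def pvIdxOf (c : Char) : Int := (c.toNat : Int) - 97

-- cnt[k] (Python semantics; in range under Pre_, out of range would be IndexError in Python)
def pvGetC (cnt : List Int) (k : Int) : Int := PySem.List.pyGetD cnt k 0

-- cnt[k] += v (Python semantics; in range under Pre_)
def pvAddC (cnt : List Int) (k : Int) (v : Int) : List Int :=
  PySem.List.pySetD cnt k (pvGetC cnt k + v)

-- cnt[ord(char) - 97] += 1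
def pvBump (cnt : List Int) (c : Char) : List Int := pvAddC cnt (pvIdxOf c) 1

-- the `for i in range(window_size, len(encryption_text))` loop of A, with early return
def is_encryptable_go (E : List Char) (plain_cnt : List Int) (ws : Int)
    (window_cnt : List Int) (diff : Int) : List Int → Bool
  | [] => false
  | i :: rest =>
    let remove_index := pvIdxOf ((PySem.List.pyGet? E (i - ws)).getD 'a')
    let add_index := pvIdxOf ((PySem.List.pyGet? E i).getD 'a')
    let d1 := if pvGetC plain_cnt remove_index = pvGetC window_cnt remove_index then diff + 1 else diff
    let w1 := pvAddC window_cnt remove_index (-1)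
    let d2 := if pvGetC plain_cnt remove_index = pvGetC w1 remove_index then d1 - 1 else d1
    let d3 := if pvGetC plain_cnt add_index = pvGetC w1 add_index then d2 + 1 else d2
    let w2 := pvAddC w1 add_index 1
    let d4 := if pvGetC plain_cnt add_index = pvGetC w2 add_index then d3 - 1 else d3
    if d4 = 0 then true else is_encryptable_go E plain_cnt ws w2 d4 rest

def is_encryptable (encryption_text : String) (plain_text : String) : Bool :=
  let E := encryption_text.toList
  let P := plain_text.toList
  let window_size : Int := (P.length : Int)
  let window_cnt := (PySem.List.slice E none (some window_size)).foldl pvBump (List.replicate 26 0)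
  let plain_cnt := P.foldl pvBump (List.replicate 26 0)
  let diff : Int :=
    ((PySem.List.pyRange 0 26 1).countP (fun i => pvGetC window_cnt i != pvGetC plain_cnt i) : Int)
  if diff = 0 then true
  else is_encryptable_go E plain_cnt window_size window_cnt diff
        (PySem.List.pyRange window_size (E.length : Int) 1)

-- ===== PORT B =====

def is_encryptable_alt (encryption_text : String) (plain_text : String) : Bool :=
  let E := encryption_text.toList
  let P := plain_text.toList
  let plain_cnt := P.foldl pvBump (List.replicate 26 0)
  let window_size : Int := (P.length : Int)
  (PySem.List.pyRange 0 ((E.length : Int) - window_size + 1) 1).any (fun start =>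
    (PySem.List.slice E (some start) (some (start + window_size))).foldl pvBump
      (List.replicate 26 0) == plain_cnt)

-- ===== PRECONDITION & SPEC =====

-- Pre_ excludes inputs containing a character outside 'G'..'z' (ord 71..122): on those the
-- count index ord(c)-97 falls outside [-26, 25] and Python raises IndexError (except in the
-- rare case that A returns True before reaching such a character — see the cite).
def Pre_is_encryptable (encryption_text : String) (plain_text : String) : Prop :=
  ((encryption_text.toList ++ plain_text.toList).all
    (fun c => 71 ≤ c.toNat && c.toNat ≤ 122)) = true
instance (encryption_text : String) (plain_text : String) : Decidable (Pre_is_encryptable encryption_text plain_text) := by unfold Pre_is_encryptable; infer_instance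

def pvWitness_is_encryptable : String × String := ("abcba", "cba")

def Spec_is_encryptable (encryption_text : String) (plain_text : String) (out : Bool) : Prop := out = is_encryptable_alt encryption_text plain_text
instance (encryption_text : String) (plain_text : String) (out : Bool) : Decidable (Spec_is_encryptable encryption_text plain_text out) := by unfold Spec_is_encryptable; infer_instance

-- ===== CLAIM (what is proved, stated in full; the proofs are below) =====
def Claim_equal_is_encryptable : Prop := ∀ (encryption_text : String) (plain_text : String), Dom_is_encryptable encryption_text plain_text → Pre_is_encryptable encryption_text plain_text → Spec_is_encryptable encryption_text plain_text (is_encryptable encryption_text plain_text)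

-- ===== LEMMAS AND PROOFS =====

-- proof-side abbreviations
def pvZC : List Int := List.replicate 26 0
def pvM (c : Char) : Nat := (c.toNat - 71) % 26
def pvGoodC (c : Char) : Prop := 71 ≤ c.toNat ∧ c.toNat ≤ 122
def pvGood (l : List Char) : Prop := ∀ c ∈ l, pvGoodC c
def pvCnt (l : List Char) : List Int := l.foldl pvBump pvZC
def pvBI (w : List Int) (i : Nat) : List Int := w.set i (w.getD i 0 + 1)
def pvDM (w p : List Int) : Int := ((List.range 26).countP (fun i => w.getD i 0 != p.getD i 0) : Int)

theorem pv_getD_set_self (l : List Int) (j : Nat) (a : Int) (hj : j < l.length) :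
    (l.set j a).getD j 0 = a := by
  rw [List.getD_eq_getElem _ 0 (by simpa using hj)]; simp

theorem pv_getD_set_ne (l : List Int) (i j : Nat) (a : Int) (h : i ≠ j) (hj : j < l.length) :
    (l.set i a).getD j 0 = l.getD j 0 := by
  rw [List.getD_eq_getElem l 0 hj, List.getD_eq_getElem _ 0 (by simpa using hj),
    List.getElem_set_ne (by omega)]

theorem pv_sum_set (l : List Int) (i : Nat) (a : Int) (h : i < l.length) :
    (l.set i a).sum = l.sum - l[i] + a := by
  induction l generalizing i with
  | nil => simp at h
  | cons x t ih =>
    cases i with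
    | zero => simp [List.set]; ring
    | succ n =>
      simp only [List.set, List.sum_cons, List.getElem_cons_succ]
      rw [ih n (by simpa using h)]; ring

theorem pv_countP_congr (p q : Nat → Bool) (l : List Nat) (h : ∀ a ∈ l, p a = q a) :
    l.countP p = l.countP q := by
  simp only [List.countP_eq_length_filter]
  rw [List.filter_congr h]

theorem pv_pySetD_neg (xs : List Int) (k : Nat) (h1 : 0 < k) (h2 : k ≤ xs.length) (v : Int) :
    PySem.List.pySetD xs (-(k : Int)) v = xs.set (xs.length - k) v := by
  simp only [PySem.List.pySetD, PySem.List.pySet?, PySem.List.pyIdx?]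
  split_ifs with ha hb hc <;> simp_all

theorem pvM_lt (c : Char) : pvM c < 26 := Nat.mod_lt _ (by norm_num)

theorem pv_length_pvBump (w : List Int) (c : Char) : (pvBump w c).length = w.length :=
  PySem.List.length_pySetD w (pvIdxOf c) _

theorem pv_length_foldl (l : List Char) (z : List Int) : (l.foldl pvBump z).length = z.length := by
  induction l generalizing z with
  | nil => rfl
  | cons c t ih =>
    simp only [List.foldl_cons]
    rw [ih (pvBump z c), pv_length_pvBump]

theorem pv_length_pvCnt (l : List Char) : (pvCnt l).length = 26 := by
  rw [pvCnt, pv_length_foldl]; simp [pvZC]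

theorem pvGetC_good (w : List Int) (hw : w.length = 26) (c : Char) (hc : pvGoodC c) :
    pvGetC w (pvIdxOf c) = w.getD (pvM c) 0 := by
  obtain ⟨h1, h2⟩ := hc
  by_cases h : 97 ≤ c.toNat
  · have he : pvIdxOf c = ((c.toNat - 97 : Nat) : Int) := by unfold pvIdxOf; omega
    have hm : pvM c = c.toNat - 97 := by unfold pvM; omega
    rw [pvGetC, he, PySem.List.pyGetD_natCast, hm]
  · have he : pvIdxOf c = -(((97 - c.toNat : Nat)) : Int) := by unfold pvIdxOf; omega
    have hm : w.length - (97 - c.toNat) = pvM c := by unfold pvM; omega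
    rw [pvGetC, he, PySem.List.pyGetD_neg_natCast w _ 0 (by omega) (by omega),
      List.getD_eq_getElem w 0 (by rw [← hm]; omega)]
    congr 1

theorem pvAddC_good (w : List Int) (hw : w.length = 26) (c : Char) (hc : pvGoodC c) (v : Int) :
    pvAddC w (pvIdxOf c) v = w.set (pvM c) (w.getD (pvM c) 0 + v) := by
  rw [pvAddC, pvGetC_good w hw c hc]
  obtain ⟨h1, h2⟩ := hc
  by_cases h : 97 ≤ c.toNat
  · have he : pvIdxOf c = ((c.toNat - 97 : Nat) : Int) := by unfold pvIdxOf; omega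
    have hm : pvM c = c.toNat - 97 := by unfold pvM; omega
    rw [he, PySem.List.pySetD_natCast, hm]
  · have he : pvIdxOf c = -(((97 - c.toNat : Nat)) : Int) := by unfold pvIdxOf; omega
    have hm : w.length - (97 - c.toNat) = pvM c := by unfold pvM; omega
    rw [he, pv_pySetD_neg w _ (by omega) (by omega), hm]

theorem pvBump_eq (w : List Int) (hw : w.length = 26) (c : Char) (hc : pvGoodC c) :
    pvBump w c = pvBI w (pvM c) :=
  pvAddC_good w hw c hc 1

theorem pvBI_comm (w : List Int) (i j : Nat) (hi : i < w.length) (hj : j < w.length) :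
    pvBI (pvBI w i) j = pvBI (pvBI w j) i := by
  by_cases hij : i = j
  · subst hij; rfl
  · unfold pvBI
    rw [pv_getD_set_ne w i j _ hij hj, pv_getD_set_ne w j i _ (Ne.symm hij) hi,
      List.set_comm _ _ hij]

theorem pv_foldl_pvBI (l : List Char) :
    pvGood l → ∀ (z : List Int), z.length = 26 → ∀ (i : Nat), i < 26 →
      l.foldl pvBump (pvBI z i) = pvBI (l.foldl pvBump z) i := by
  induction l with
  | nil => intro _ z _ i _; rfl
  | cons c t ih =>
    intro hl z hz i hi
    have hc : pvGoodC c := hl c (by simp)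
    have ht : pvGood t := fun x hx => hl x (by simp [hx])
    simp only [List.foldl_cons]
    rw [pvBump_eq (pvBI z i) (by simp [pvBI, hz]) c hc,
      pvBI_comm z i (pvM c) (by omega) (by rw [hz]; exact pvM_lt c),
      ← pvBump_eq z hz c hc,
      ih ht (pvBump z c) (by rw [pv_length_pvBump, hz]) i hi]

theorem pvCnt_cons (c : Char) (l : List Char) (hc : pvGoodC c) (hl : pvGood l) :
    pvCnt (c :: l) = pvBI (pvCnt l) (pvM c) := by
  unfold pvCnt
  simp only [List.foldl_cons]
  rw [pvBump_eq pvZC (by simp [pvZC]) c hc,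
    pv_foldl_pvBI l hl pvZC (by simp [pvZC]) (pvM c) (pvM_lt c)]

theorem pvCnt_snoc (l : List Char) (c : Char) (hc : pvGoodC c) :
    pvCnt (l ++ [c]) = pvBI (pvCnt l) (pvM c) := by
  unfold pvCnt
  rw [List.foldl_append]
  simp only [List.foldl_cons, List.foldl_nil]
  exact pvBump_eq _ (pv_length_pvCnt l) c hc

theorem pv_cancel (x : List Int) (i : Nat) (hi : i < x.length) :
    (pvBI x i).set i ((pvBI x i).getD i 0 + (-1)) = x := by
  unfold pvBI
  rw [pv_getD_set_self x i _ hi, List.set_set]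
  have h : x.getD i 0 + 1 + (-1) = x.getD i 0 := by ring
  rw [h, List.getD_eq_getElem x 0 hi, List.set_getElem_self]

theorem pv_sum_pvBI (w : List Int) (i : Nat) (hi : i < w.length) :
    (pvBI w i).sum = w.sum + 1 := by
  unfold pvBI
  rw [pv_sum_set w i _ hi, List.getD_eq_getElem w 0 hi]
  ring

theorem pv_sum_pvCnt (l : List Char) : pvGood l → (pvCnt l).sum = (l.length : Int) := by
  induction l with
  | nil => intro _; simp [pvCnt, pvZC]
  | cons c t ih =>
    intro hl
    have hc : pvGoodC c := hl c (by simp)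
    have ht : pvGood t := fun x hx => hl x (by simp [hx])
    rw [pvCnt_cons c t hc ht, pv_sum_pvBI _ _ (by rw [pv_length_pvCnt]; exact pvM_lt c), ih ht]
    simp only [List.length_cons]
    push_cast; ring

theorem pvDM_eq_zero_iff (w p : List Int) (hw : w.length = 26) (hp : p.length = 26) :
    pvDM w p = 0 ↔ w = p := by
  unfold pvDM
  rw [Int.natCast_eq_zero, List.countP_eq_zero]
  constructor
  · intro h
    apply List.ext_getElem (by omega)
    intro i h1 h2
    have hi : i < 26 := by omega
    have := h i (List.mem_range.mpr hi)
    simp only [bne_iff_ne, ne_eq, Decidable.not_not] at this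
    rwa [List.getD_eq_getElem w 0 h1, List.getD_eq_getElem p 0 h2] at this
  · intro h i _
    rw [h]
    simp

theorem pv_countP_set (w p : List Int) (v : Int) (i : Nat) (hw : w.length = 26) (hi : i < 26) :
    ∀ (L : List Nat), L.Nodup → i ∈ L → (∀ j ∈ L, j < 26) →
      ((L.countP (fun j => (w.set i v).getD j 0 != p.getD j 0) : Int))
        = (L.countP (fun j => w.getD j 0 != p.getD j 0) : Int)
          + (if p.getD i 0 = w.getD i 0 then 1 else 0) - (if p.getD i 0 = v then 1 else 0) := by
  intro L
  induction L with
  | nil => intro _ h _; simp at h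
  | cons a t ih =>
    intro hnd hmem hb
    have hnd' : t.Nodup := (List.nodup_cons.mp hnd).2
    have hbt : ∀ j ∈ t, j < 26 := fun j hj => hb j (by simp [hj])
    rw [List.countP_cons, List.countP_cons]
    by_cases ha : a = i
    · subst ha
      have hat : a ∉ t := (List.nodup_cons.mp hnd).1
      have htail : t.countP (fun j => (w.set a v).getD j 0 != p.getD j 0)
          = t.countP (fun j => w.getD j 0 != p.getD j 0) := by
        apply pv_countP_congr
        intro j hj
        rw [pv_getD_set_ne w a j v (fun he => hat (he ▸ hj)) (by rw [hw]; exact hbt j hj)]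
      have hv : (w.set a v).getD a 0 = v :=
        pv_getD_set_self w a v (by rw [hw]; exact hb a (by simp))
      rw [htail]
      simp only [hv]
      push_cast [Nat.cast_ite]
      simp only [bne_iff_ne, ne_eq]
      split_ifs <;> omega
    · have hit : i ∈ t := by
        rcases List.mem_cons.mp hmem with h | h
        · exact absurd h.symm ha
        · exact h
      have hhead : ((w.set i v).getD a 0 != p.getD a 0) = (w.getD a 0 != p.getD a 0) := by
        rw [pv_getD_set_ne w i a v (fun he => ha he.symm) (by rw [hw]; exact hb a (by simp))]
      rw [hhead]
      push_cast [Nat.cast_ite]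
      rw [ih hnd' hit hbt]
      ring

theorem pvDM_set (w p : List Int) (hw : w.length = 26) (i : Nat) (hi : i < 26) (v : Int) :
    pvDM (w.set i v) p = pvDM w p
      + (if p.getD i 0 = w.getD i 0 then 1 else 0) - (if p.getD i 0 = v then 1 else 0) := by
  unfold pvDM
  exact pv_countP_set w p v i hw hi (List.range 26) (List.nodup_range)
    (List.mem_range.mpr hi) (fun j hj => List.mem_range.mp hj)

theorem pvStep (w p : List Int) (hw : w.length = 26) (i : Nat) (hi : i < 26) (v d : Int)
    (hd : d = pvDM w p) :
    (if p.getD i 0 = (w.set i v).getD i 0 then (if p.getD i 0 = w.getD i 0 then d + 1 else d) - 1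
     else (if p.getD i 0 = w.getD i 0 then d + 1 else d)) = pvDM (w.set i v) p := by
  subst hd
  rw [pv_getD_set_self w i v (by omega), pvDM_set w p hw i hi v]
  split_ifs <;> omega

theorem pv_diff_expr (w p : List Int) :
    ((PySem.List.pyRange 0 26 1).countP (fun i => pvGetC w i != pvGetC p i) : Int) = pvDM w p := by
  rw [show ((26 : Int)) = ((26 : Nat) : Int) from rfl, PySem.List.pyRange_zero_nat,
    List.countP_map]
  unfold pvDM
  congr 2
  funext k
  simp [pvGetC, PySem.List.pyGetD_natCast]

theorem pv_go_iff (E P : List Char) (hE : pvGood E) (ws : Nat) (hws : 1 ≤ ws) :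
    ∀ (n i0 : Nat), E.length - i0 = n → ws ≤ i0 → i0 ≤ E.length →
      ∀ (w : List Int) (d : Int),
        w = pvCnt ((E.drop (i0 - ws)).take ws) → d = pvDM w (pvCnt P) →
        (is_encryptable_go E (pvCnt P) (ws : Int) w d
            (PySem.List.pyRange (i0 : Int) (E.length : Int) 1) = true
          ↔ ∃ j : Nat, i0 ≤ j ∧ j < E.length ∧
              pvCnt ((E.drop (j + 1 - ws)).take ws) = pvCnt P) := by
  intro n
  induction n with
  | zero =>
    intro i0 h0 h1 h2 w d hw hd
    have hlen : i0 = E.length := by omega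
    subst hlen
    rw [PySem.List.pyRange_one_eq_nil (le_refl _)]
    simp only [is_encryptable_go, Bool.false_eq_true, false_iff]
    rintro ⟨j, hj1, hj2, -⟩
    omega
  | succ n ih =>
    intro i0 h0 h1 h2 w d hw hd
    have hi0 : i0 < E.length := by omega
    obtain ⟨k, hk⟩ : ∃ k, ws = k + 1 := ⟨ws - 1, by omega⟩
    subst hk
    have hp26 : (pvCnt P).length = 26 := pv_length_pvCnt P
    have hw26 : w.length = 26 := by rw [hw]; exact pv_length_pvCnt _
    have hj0 : i0 - (k + 1) < E.length := by omega
    have hgr : pvGoodC (E[i0 - (k + 1)]'hj0) := hE _ (List.getElem_mem hj0)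
    have hga : pvGoodC (E[i0]'hi0) := hE _ (List.getElem_mem hi0)
    -- window decomposition
    have hWold : (E.drop (i0 - (k + 1))).take (k + 1)
        = (E[i0 - (k + 1)]'hj0) :: (E.drop (i0 - (k + 1) + 1)).take k := by
      rw [List.drop_eq_getElem_cons hj0, List.take_succ_cons]
    have hWnew : (E.drop (i0 + 1 - (k + 1))).take (k + 1)
        = ((E.drop (i0 - (k + 1) + 1)).take k) ++ [E[i0]'hi0] := by
      have h1' : i0 + 1 - (k + 1) = i0 - (k + 1) + 1 := by omega
      have h2' : (E.drop (i0 - (k + 1) + 1))[k]? = some (E[i0]'hi0) := by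
        rw [List.getElem?_drop, show i0 - (k + 1) + 1 + k = i0 by omega]
        exact List.getElem?_eq_getElem hi0
      rw [h1', List.take_add_one, h2']
      rfl
    have hgoodM : pvGood ((E.drop (i0 - (k + 1) + 1)).take k) := fun x hx =>
      hE x (List.mem_of_mem_drop (List.mem_of_mem_take hx))
    have hM26 : (pvCnt ((E.drop (i0 - (k + 1) + 1)).take k)).length = 26 := pv_length_pvCnt _
    have hwM : w = pvBI (pvCnt ((E.drop (i0 - (k + 1) + 1)).take k)) (pvM (E[i0 - (k + 1)]'hj0)) := by
      rw [hw, hWold, pvCnt_cons _ _ hgr hgoodM]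
    have hcancel : w.set (pvM (E[i0 - (k + 1)]'hj0)) (w.getD (pvM (E[i0 - (k + 1)]'hj0)) 0 + (-1))
        = pvCnt ((E.drop (i0 - (k + 1) + 1)).take k) := by
      rw [hwM]
      exact pv_cancel _ _ (by rw [hM26]; exact pvM_lt _)
    have hsnoc : (pvCnt ((E.drop (i0 - (k + 1) + 1)).take k)).set (pvM (E[i0]'hi0))
          ((pvCnt ((E.drop (i0 - (k + 1) + 1)).take k)).getD (pvM (E[i0]'hi0)) 0 + 1)
        = pvCnt ((E.drop (i0 + 1 - (k + 1))).take (k + 1)) := by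
      rw [hWnew, pvCnt_snoc _ _ hga]
      rfl
    -- unfold one loop iteration
    rw [PySem.List.pyRange_one_cons (by exact_mod_cast hi0)]
    simp only [is_encryptable_go]
    rw [show (i0 : Int) - ((k + 1 : Nat) : Int) = ((i0 - (k + 1) : Nat) : Int) by omega,
      PySem.List.pyGet?_natCast E (i0 - (k + 1)), PySem.List.pyGet?_natCast E i0,
      List.getElem?_eq_getElem hj0, List.getElem?_eq_getElem hi0]
    simp only [Option.getD_some]
    simp only [pvAddC_good w hw26 (E[i0 - (k + 1)]'hj0) hgr (-1)]
    have hset26 : (w.set (pvM (E[i0 - (k + 1)]'hj0))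
        (w.getD (pvM (E[i0 - (k + 1)]'hj0)) 0 + (-1))).length = 26 := by
      rw [List.length_set, hw26]
    simp only [pvGetC_good (pvCnt P) hp26 (E[i0 - (k + 1)]'hj0) hgr,
      pvGetC_good (pvCnt P) hp26 (E[i0]'hi0) hga,
      pvGetC_good w hw26 (E[i0 - (k + 1)]'hj0) hgr,
      pvGetC_good _ hset26 (E[i0 - (k + 1)]'hj0) hgr,
      pvGetC_good _ hset26 (E[i0]'hi0) hga]
    simp only [pvStep w (pvCnt P) hw26 (pvM (E[i0 - (k + 1)]'hj0)) (pvM_lt _)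
      (w.getD (pvM (E[i0 - (k + 1)]'hj0)) 0 + (-1)) d hd]
    simp only [hcancel]
    simp only [pvAddC_good _ hM26 (E[i0]'hi0) hga 1]
    have hset26' : ((pvCnt ((E.drop (i0 - (k + 1) + 1)).take k)).set (pvM (E[i0]'hi0))
        ((pvCnt ((E.drop (i0 - (k + 1) + 1)).take k)).getD (pvM (E[i0]'hi0)) 0 + 1)).length = 26 := by
      rw [List.length_set, hM26]
    simp only [pvGetC_good _ hset26' (E[i0]'hi0) hga]
    simp only [pvStep _ (pvCnt P) hM26 (pvM (E[i0]'hi0)) (pvM_lt _)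
      ((pvCnt ((E.drop (i0 - (k + 1) + 1)).take k)).getD (pvM (E[i0]'hi0)) 0 + 1)
      (pvDM (pvCnt ((E.drop (i0 - (k + 1) + 1)).take k)) (pvCnt P)) rfl]
    simp only [hsnoc]
    have hN26 : (pvCnt ((E.drop (i0 + 1 - (k + 1))).take (k + 1))).length = 26 := pv_length_pvCnt _
    by_cases h0' : pvDM (pvCnt ((E.drop (i0 + 1 - (k + 1))).take (k + 1))) (pvCnt P) = 0
    · rw [if_pos h0']
      simp only [true_iff]
      exact ⟨i0, le_refl _, hi0, (pvDM_eq_zero_iff _ _ hN26 hp26).mp h0'⟩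
    · rw [if_neg h0',
        show (i0 : Int) + 1 = ((i0 + 1 : Nat) : Int) by omega,
        ih (i0 + 1) (by omega) (by omega) (by omega) _ _ rfl rfl]
      constructor
      · rintro ⟨j, hj1, hj2, hj3⟩
        exact ⟨j, by omega, hj2, hj3⟩
      · rintro ⟨j, hj1, hj2, hj3⟩
        rcases Nat.eq_or_lt_of_le hj1 with h | h
        · exfalso
          apply h0'
          rw [(pvDM_eq_zero_iff _ _ hN26 hp26)]
          rw [← h] at hj3
          exact hj3
        · exact ⟨j, by omega, hj2, hj3⟩

theorem pv_B_iff (e p : String) :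
    is_encryptable_alt e p = true
      ↔ ∃ j : Nat, j + p.toList.length ≤ e.toList.length ∧
          pvCnt ((e.toList.drop j).take p.toList.length) = pvCnt p.toList := by
  unfold is_encryptable_alt
  simp only [List.any_eq_true]
  constructor
  · rintro ⟨s, hs, hpred⟩
    rw [PySem.List.mem_pyRange_one] at hs
    obtain ⟨j, rfl⟩ : ∃ j : Nat, s = (j : Int) := ⟨s.toNat, by omega⟩
    rw [PySem.List.slice_natCast_add, beq_iff_eq] at hpred
    exact ⟨j, by omega, hpred⟩
  · rintro ⟨j, hj, hcnt⟩
    refine ⟨(j : Int), ?_, ?_⟩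
    · rw [PySem.List.mem_pyRange_one]
      omega
    · rw [PySem.List.slice_natCast_add, beq_iff_eq]
      exact hcnt

theorem pv_A_iff (e p : String) (hE : pvGood e.toList) (hP : pvGood p.toList) :
    is_encryptable e p = true
      ↔ ∃ j : Nat, j + p.toList.length ≤ e.toList.length ∧
          pvCnt ((e.toList.drop j).take p.toList.length) = pvCnt p.toList := by
  simp only [is_encryptable]
  rw [PySem.List.slice_to_natCast, pv_diff_expr,
    show List.foldl pvBump (List.replicate 26 0) = pvCnt from rfl]
  set E := e.toList with hEdef
  set P := p.toList with hPdef
  set ws := P.length with hwsdef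
  by_cases hws0 : ws = 0
  · have hPnil : P = [] := List.length_eq_zero_iff.mp hws0
    rw [hws0]
    have h0 : pvDM (pvCnt (E.take 0)) (pvCnt P) = 0 := by
      rw [hPnil]
      simp only [List.take_zero]
      exact (pvDM_eq_zero_iff _ _ (pv_length_pvCnt _) (pv_length_pvCnt _)).mpr rfl
    rw [if_pos h0]
    simp only [true_iff]
    exact ⟨0, by omega, by
      rw [hPnil]
      simp⟩
  · have hws1 : 1 ≤ ws := by omega
    by_cases hlen : E.length < ws
    · have htake : E.take ws = E := List.take_of_length_le (by omega)
      have hne : pvCnt (E.take ws) ≠ pvCnt P := by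
        intro hcontra
        have h1 := pv_sum_pvCnt (E.take ws) (fun x hx => hE x (List.mem_of_mem_take hx))
        have h2 := pv_sum_pvCnt P hP
        rw [hcontra, h2, htake] at h1
        have : P.length = E.length := by exact_mod_cast h1
        omega
      rw [if_neg (fun hc => hne ((pvDM_eq_zero_iff _ _ (pv_length_pvCnt _) (pv_length_pvCnt _)).mp hc))]
      rw [PySem.List.pyRange_one_eq_nil (by exact_mod_cast Nat.le_of_lt hlen)]
      simp only [is_encryptable_go, Bool.false_eq_true, false_iff]
      rintro ⟨j, hj, -⟩
      omega
    · by_cases hd0 : pvDM (pvCnt (E.take ws)) (pvCnt P) = 0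
      · rw [if_pos hd0]
        simp only [true_iff]
        exact ⟨0, by omega, by
          simpa using (pvDM_eq_zero_iff _ _ (pv_length_pvCnt _) (pv_length_pvCnt _)).mp hd0⟩
      · rw [if_neg hd0]
        rw [pv_go_iff E P hE ws hws1 (E.length - ws) ws rfl (le_refl _) (by omega) _ _
          (by rw [Nat.sub_self, List.drop_zero]) rfl]
        constructor
        · rintro ⟨j, hj1, hj2, hj3⟩
          exact ⟨j + 1 - ws, by omega, by
            rwa [show j + 1 - ws = j + 1 - ws from rfl] at hj3⟩
        · rintro ⟨j, hj1, hj3⟩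
          rcases Nat.eq_zero_or_pos j with hj0 | hj0
          · exfalso
            apply hd0
            rw [pvDM_eq_zero_iff _ _ (pv_length_pvCnt _) (pv_length_pvCnt _)]
            rw [hj0] at hj3
            simpa using hj3
          · refine ⟨j + ws - 1, by omega, by omega, ?_⟩
            rw [show j + ws - 1 + 1 - ws = j by omega]
            exact hj3

-- ===== VERDICT (by name: the statement is the Claim_ definition above) =====
theorem is_encryptable_spec : Claim_equal_is_encryptable := by
  intro e p hdom hpre
  unfold Spec_is_encryptable
  unfold Pre_is_encryptable at hpre
  simp only [List.all_append, Bool.and_eq_true, List.all_eq_true, Bool.and_eq_true,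
    decide_eq_true_eq] at hpre
  have hE : pvGood e.toList := fun c hc => by
    have := hpre.1 c hc
    exact ⟨by omega, by omega⟩
  have hP : pvGood p.toList := fun c hc => by
    have := hpre.2 c hc
    exact ⟨by omega, by omega⟩
  rw [Bool.eq_iff_iff, pv_A_iff e p hE hP, pv_B_iff e p]
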